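-- pv_equiv track=rewrite | github.com/Quelt1c/pilot | bot_engine.py | _handle_condition
-- ===== SOURCE A (Python) =====
-- def _handle_condition(node, config, session, update):
--     conditions = config.get('conditions', [])
--     user_text  = (update.get('text') or '').strip()
--     if not user_text:
--         return None
--     for idx, cond in enumerate(conditions):
--         if user_text.lower() == cond.lower():
--             return f'out-{idx}'
--     for idx, cond in enumerate(conditions):
--         if cond.lower() in user_text.lower():
--             return f'out-{idx}'
--     return 'out-0'
-- ===== SOURCE B (Python) =====
-- def _handle_condition(node, config, session, update):
--     conditions = config.get('conditions', [])
--     user_text = (update.get('text') or '').strip()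
--     if not user_text:
--         return None
--     user_lower = user_text.lower()
--     first_exact = None
--     first_sub = None
--     for idx, cond in enumerate(conditions):
--         cond_lower = cond.lower()
--         if first_exact is None and user_lower == cond_lower:
--             first_exact = idx
--         if first_sub is None and cond_lower in user_lower:
--             first_sub = idx
--     if first_exact is not None:
--         return f'out-{first_exact}'
--     if first_sub is not None:
--         return f'out-{first_sub}'
--     return 'out-0'
-- ===== Notes on version B (the rewrite author's own statement) =====
-- stated objective: alternative
-- what changed: A's two full passes over conditions (an exact-match pass, then a substring pass) become one pass over enumerate(conditions) that records the first exact-match index and the first substring-match index in two accumulators and decides afterwards, lowering user_text once.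
import Mathlib
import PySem

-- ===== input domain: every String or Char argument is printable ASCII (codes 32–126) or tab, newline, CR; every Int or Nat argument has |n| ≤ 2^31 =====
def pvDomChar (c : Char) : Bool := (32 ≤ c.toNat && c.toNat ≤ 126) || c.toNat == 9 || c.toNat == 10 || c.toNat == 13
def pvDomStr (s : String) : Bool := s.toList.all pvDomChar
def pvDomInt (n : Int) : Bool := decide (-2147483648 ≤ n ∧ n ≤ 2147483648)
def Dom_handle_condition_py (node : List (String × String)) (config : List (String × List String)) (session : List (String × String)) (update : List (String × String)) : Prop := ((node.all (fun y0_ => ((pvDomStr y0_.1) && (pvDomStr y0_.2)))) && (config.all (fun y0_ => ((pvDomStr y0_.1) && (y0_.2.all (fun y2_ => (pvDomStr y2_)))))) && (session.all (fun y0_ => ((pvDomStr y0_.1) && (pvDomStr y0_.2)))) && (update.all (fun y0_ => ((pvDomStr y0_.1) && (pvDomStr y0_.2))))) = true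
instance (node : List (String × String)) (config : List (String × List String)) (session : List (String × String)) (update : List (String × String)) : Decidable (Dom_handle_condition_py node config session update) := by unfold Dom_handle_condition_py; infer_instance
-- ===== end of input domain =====

-- B replaces A's two passes over the conditions by one pass recording the first exact-match
-- and first substring-match indices, lowering user_text only once; same asymptotic cost (objective: alternative).

-- ===== PORT A =====
-- first loop: return 'out-idx' at the first condition equal (case-insensitively) to user_text
def pvALoop1 (ul : String) : List String → Int → Option String
  | [], _ => none
  | c :: rest, idx =>
      if ul == PySem.Str.lower c then some ("out-" ++ PySem.Int.toStr idx)
      else pvALoop1 ul rest (idx + 1)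

-- second loop: return 'out-idx' at the first condition contained in user_text (lowered each time, as A does)
def pvALoop2 (ul : String) : List String → Int → Option String
  | [], _ => none
  | c :: rest, idx =>
      if PySem.Str.isIn (PySem.Str.lower c) ul then some ("out-" ++ PySem.Int.toStr idx)
      else pvALoop2 ul rest (idx + 1)

def handle_condition_py (node : List (String × String)) (config : List (String × List String)) (session : List (String × String)) (update : List (String × String)) : Option String :=
  let conditions := (PySem.Dict.get? (PySem.Dict.mk config) "conditions").getD []
  -- (update.get('text') or ''): a missing key and the value '' both give '' — getD "" is exact
  let user_text := PySem.Str.strip ((PySem.Dict.get? (PySem.Dict.mk update) "text").getD "")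
  if user_text == "" then none
  else
    match pvALoop1 (PySem.Str.lower user_text) conditions 0 with
    | some r => some r
    | none =>
      match pvALoop2 (PySem.Str.lower user_text) conditions 0 with
      | some r => some r
      | none => some "out-0"

-- ===== PORT B =====
def pvBStep (ul : String) (st : Option Int × Option Int) (p : Int × String) : Option Int × Option Int :=
  let cl := PySem.Str.lower p.2
  let st1 := if st.1.isNone && (ul == cl) then (some p.1, st.2) else st
  if st1.2.isNone && PySem.Str.isIn cl ul then (st1.1, some p.1) else st1

def handle_condition_py_alt (node : List (String × String)) (config : List (String × List String)) (session : List (String × String)) (update : List (String × String)) : Option String :=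
  let conditions := (PySem.Dict.get? (PySem.Dict.mk config) "conditions").getD []
  let user_text := PySem.Str.strip ((PySem.Dict.get? (PySem.Dict.mk update) "text").getD "")
  if user_text == "" then none
  else
    let ul := PySem.Str.lower user_text
    let st := (PySem.List.enumerate conditions 0).foldl (pvBStep ul) (none, none)
    match st.1 with
    | some i => some ("out-" ++ PySem.Int.toStr i)
    | none =>
      match st.2 with
      | some i => some ("out-" ++ PySem.Int.toStr i)
      | none => some "out-0"

-- ===== PRECONDITION & SPEC =====
def Spec_handle_condition_py (node : List (String × String)) (config : List (String × List String)) (session : List (String × String)) (update : List (String × String)) (out : Option String) : Prop := out = handle_condition_py_alt node config session update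
instance (node : List (String × String)) (config : List (String × List String)) (session : List (String × String)) (update : List (String × String)) (out : Option String) : Decidable (Spec_handle_condition_py node config session update out) := by unfold Spec_handle_condition_py; infer_instance

-- ===== CLAIM (what is proved, stated in full; the proofs are below) =====
def Claim_equal_handle_condition_py : Prop := ∀ (node : List (String × String)) (config : List (String × List String)) (session : List (String × String)) (update : List (String × String)), Dom_handle_condition_py node config session update → Spec_handle_condition_py node config session update (handle_condition_py node config session update)

-- ===== LEMMAS AND PROOFS =====

-- first exact-match index / first substring-match index, as Options on Int, starting at k
def pvF1 (ul : String) : List String → Int → Option Int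
  | [], _ => none
  | c :: rest, k => if ul == PySem.Str.lower c then some k else pvF1 ul rest (k + 1)

def pvF2 (ul : String) : List String → Int → Option Int
  | [], _ => none
  | c :: rest, k => if PySem.Str.isIn (PySem.Str.lower c) ul then some k else pvF2 ul rest (k + 1)

theorem pvALoop1_eq (ul : String) (l : List String) (k : Int) :
    pvALoop1 ul l k = (pvF1 ul l k).map (fun i => "out-" ++ PySem.Int.toStr i) := by
  induction l generalizing k with
  | nil => rfl
  | cons c rest ih => simp [pvALoop1, pvF1]; split <;> simp [ih]

theorem pvALoop2_eq (ul : String) (l : List String) (k : Int) :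
    pvALoop2 ul l k = (pvF2 ul l k).map (fun i => "out-" ++ PySem.Int.toStr i) := by
  induction l generalizing k with
  | nil => rfl
  | cons c rest ih => simp [pvALoop2, pvF2]; split <;> simp [ih]

theorem pvBFold_eq (ul : String) (l : List String) (k : Int) (a b : Option Int) :
    (PySem.List.enumerate l k).foldl (pvBStep ul) (a, b) =
      (a.orElse (fun _ => pvF1 ul l k), b.orElse (fun _ => pvF2 ul l k)) := by
  induction l generalizing k a b with
  | nil => cases a <;> cases b <;> rfl
  | cons c rest ih =>
    rw [PySem.List.enumerate_cons]
    simp only [List.foldl_cons, ih]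
    cases a <;> cases b <;>
      simp [pvBStep, pvF1, pvF2, Option.orElse] <;> split_ifs <;> simp_all

theorem handle_condition_py_eq_alt (node : List (String × String)) (config : List (String × List String)) (session : List (String × String)) (update : List (String × String)) :
    handle_condition_py node config session update = handle_condition_py_alt node config session update := by
  unfold handle_condition_py handle_condition_py_alt
  dsimp only
  split
  · rfl
  · rw [pvBFold_eq, pvALoop1_eq, pvALoop2_eq]
    cases pvF1 (PySem.Str.lower (PySem.Str.strip ((PySem.Dict.get? (PySem.Dict.mk update) "text").getD ""))) ((PySem.Dict.get? (PySem.Dict.mk config) "conditions").getD []) 0 <;>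
    cases pvF2 (PySem.Str.lower (PySem.Str.strip ((PySem.Dict.get? (PySem.Dict.mk update) "text").getD ""))) ((PySem.Dict.get? (PySem.Dict.mk config) "conditions").getD []) 0 <;>
      simp [Option.orElse]

-- ===== VERDICT (by name: the statement is the Claim_ definition above) =====
theorem handle_condition_py_spec : Claim_equal_handle_condition_py := by
  intro node config session update _
  unfold Spec_handle_condition_py
  exact handle_condition_py_eq_alt node config session update
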